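-- pv_equiv track=rewrite | github.com/brianbixby/google_hash_comp | trainer/game.py | find_slices
-- ===== SOURCE A (Python) =====
-- def find_slices(slices_map):
--     slices_dict = {}
--     for ri in range(len(slices_map)):
--         for ci in range(len(slices_map[0])):
--             slice_id = slices_map[ri][ci]
--
--             if slice_id in slices_dict:
--                 slices_dict[slice_id] = (*slices_dict[slice_id][:2],ri,ci)
--             elif slice_id != -1:
--                 slices_dict[slice_id] = (ri,ci,ri,ci)
--
--     return slices_dict.values()
-- ===== SOURCE B (Python) =====
-- def find_slices(slices_map):
--     # Two-stage: first index every cell position by slice id, then summarize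
--     # each id's position list into (first_r, first_c, last_r, last_c).
--     index = {}
--     for ri in range(len(slices_map)):
--         for ci in range(len(slices_map[0])):
--             slice_id = slices_map[ri][ci]
--             if slice_id != -1:
--                 index.setdefault(slice_id, []).append((ri, ci))
--     result = {}
--     for slice_id, coords in index.items():
--         r0, c0 = coords[0]
--         r1, c1 = coords[-1]
--         result[slice_id] = (r0, c0, r1, c1)
--     return result.values()
-- ===== Notes on version B (the rewrite author's own statement) =====
-- stated objective: alternative
-- what changed: A tracks first/last coordinates inline in one dict during the scan; B first builds an index mapping each slice id to its full list of positions, then a second pass summarizes each list's first and last entries into the result dict.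
import Mathlib
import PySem

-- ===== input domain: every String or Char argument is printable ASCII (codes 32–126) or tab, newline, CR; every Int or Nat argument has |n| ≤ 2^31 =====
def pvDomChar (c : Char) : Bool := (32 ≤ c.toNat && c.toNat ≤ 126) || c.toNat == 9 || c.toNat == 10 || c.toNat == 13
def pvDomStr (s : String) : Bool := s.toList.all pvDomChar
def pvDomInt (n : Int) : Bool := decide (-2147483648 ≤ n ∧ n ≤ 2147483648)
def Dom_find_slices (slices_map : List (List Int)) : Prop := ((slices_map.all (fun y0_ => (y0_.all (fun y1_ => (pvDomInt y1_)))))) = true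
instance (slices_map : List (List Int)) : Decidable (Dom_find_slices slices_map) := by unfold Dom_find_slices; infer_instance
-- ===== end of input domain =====

-- B replaces A's inline first/last tracking by an index of all positions per slice id
-- plus a summarizing second pass (alternative decomposition, same cost).

-- ===== PORT A =====
def find_slices (slices_map : List (List Int)) : List (Int × Int × Int × Int) :=
  let slices_dict : PySem.Dict Int (Int × Int × Int × Int) :=
    (PySem.List.pyRange 0 (slices_map.length : Int) 1).foldl (fun d ri =>
      (PySem.List.pyRange 0 ((PySem.List.pyGetD slices_map 0 []).length : Int) 1).foldl (fun d ci =>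
        let slice_id := PySem.List.pyGetD (PySem.List.pyGetD slices_map ri []) ci 0
        if d.contains slice_id then
          let v := d.getD slice_id (0, 0, 0, 0)
          d.insert slice_id (v.1, v.2.1, ri, ci)
        else if slice_id ≠ -1 then
          d.insert slice_id (ri, ci, ri, ci)
        else d) d) PySem.Dict.empty
  slices_dict.values

-- ===== PORT B =====
-- coords[0] / coords[-1] ported as headD / getLastD: every stored list is nonempty, so exact.
def find_slices_alt (slices_map : List (List Int)) : List (Int × Int × Int × Int) :=
  let index : PySem.Dict Int (List (Int × Int)) :=
    (PySem.List.pyRange 0 (slices_map.length : Int) 1).foldl (fun d ri =>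
      (PySem.List.pyRange 0 ((PySem.List.pyGetD slices_map 0 []).length : Int) 1).foldl (fun d ci =>
        let slice_id := PySem.List.pyGetD (PySem.List.pyGetD slices_map ri []) ci 0
        if slice_id ≠ -1 then d.modify slice_id [] (· ++ [(ri, ci)]) else d) d) PySem.Dict.empty
  let result : PySem.Dict Int (Int × Int × Int × Int) :=
    index.items.foldl (fun r q =>
      let first := q.2.headD (0, 0)
      let last := q.2.getLastD (0, 0)
      r.insert q.1 (first.1, first.2, last.1, last.2)) PySem.Dict.empty
  result.values

-- ===== PRECONDITION & SPEC =====
-- Pre_ excludes exactly the ragged grids on which Python A raises IndexError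
-- (some row shorter than row 0, indexed by range(len(slices_map[0]))).
def Pre_find_slices (slices_map : List (List Int)) : Prop :=
  ∀ row ∈ slices_map, (slices_map.headD []).length ≤ row.length

instance (slices_map : List (List Int)) : Decidable (Pre_find_slices slices_map) := by
  unfold Pre_find_slices; infer_instance

def pvWitness_find_slices : List (List Int) := [[1, -1], [1, 2]]

def Spec_find_slices (slices_map : List (List Int)) (out : List (Int × Int × Int × Int)) : Prop := out = find_slices_alt slices_map
instance (slices_map : List (List Int)) (out : List (Int × Int × Int × Int)) : Decidable (Spec_find_slices slices_map out) := by unfold Spec_find_slices; infer_instance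

-- ===== CLAIM (what is proved, stated in full; the proofs are below) =====
def Claim_equal_find_slices : Prop := ∀ (slices_map : List (List Int)), Dom_find_slices slices_map → Pre_find_slices slices_map → Spec_find_slices slices_map (find_slices slices_map)

-- ===== LEMMAS AND PROOFS =====

-- summarize a position list: first and last coordinates
def gsum (cs : List (Int × Int)) : Int × Int × Int × Int :=
  ((cs.headD (0, 0)).1, (cs.headD (0, 0)).2, (cs.getLastD (0, 0)).1, (cs.getLastD (0, 0)).2)

-- one cell step of A
def stepA (sm : List (List Int)) (d : PySem.Dict Int (Int × Int × Int × Int)) (p : Int × Int) :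
    PySem.Dict Int (Int × Int × Int × Int) :=
  let sid := PySem.List.pyGetD (PySem.List.pyGetD sm p.1 []) p.2 0
  if d.contains sid then
    let v := d.getD sid (0, 0, 0, 0)
    d.insert sid (v.1, v.2.1, p.1, p.2)
  else if sid ≠ -1 then d.insert sid (p.1, p.2, p.1, p.2) else d

-- one cell step of B's first stage
def stepB (sm : List (List Int)) (e : PySem.Dict Int (List (Int × Int))) (p : Int × Int) :
    PySem.Dict Int (List (Int × Int)) :=
  let sid := PySem.List.pyGetD (PySem.List.pyGetD sm p.1 []) p.2 0
  if sid ≠ -1 then e.modify sid [] (· ++ [(p.1, p.2)]) else e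

def cells (sm : List (List Int)) : List (Int × Int) :=
  (PySem.List.pyRange 0 (sm.length : Int) 1).flatMap (fun ri =>
    (PySem.List.pyRange 0 ((PySem.List.pyGetD sm 0 []).length : Int) 1).map (fun ci => (ri, ci)))

lemma foldl_flatMap {α β γ : Type} (f : α → List β) (g : γ → β → γ) (l : List α) (init : γ) :
    (l.flatMap f).foldl g init = l.foldl (fun a x => (f x).foldl g a) init := by
  induction l generalizing init with
  | nil => rfl
  | cons x xs ih => simp [List.foldl_append, ih]

lemma find_slices_eq (sm : List (List Int)) :
    find_slices sm = ((cells sm).foldl (stepA sm) PySem.Dict.empty).values := by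
  simp only [find_slices, cells, foldl_flatMap, List.foldl_map, stepA]

lemma find_slices_alt_eq (sm : List (List Int)) :
    find_slices_alt sm =
      (((cells sm).foldl (stepB sm) PySem.Dict.empty).items.foldl
        (fun r q => r.insert q.1 (gsum q.2)) PySem.Dict.empty).values := by
  simp only [find_slices_alt, cells, foldl_flatMap, List.foldl_map, stepB, gsum]

-- the invariant tying A's dict to B's index
def RelAB (d : PySem.Dict Int (Int × Int × Int × Int)) (e : PySem.Dict Int (List (Int × Int))) : Prop :=
  d.items = e.items.map (fun q => (q.1, gsum q.2)) ∧
  (∀ q ∈ e.items, q.2 ≠ []) ∧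
  e.contains (-1) = false ∧
  e.keys.Nodup

lemma rel_contains {d e} (h : RelAB d e) (k : Int) : d.contains k = e.contains k := by
  simp [PySem.Dict.contains, h.1, List.any_map, Function.comp_def]

lemma rel_get? {d e} (h : RelAB d e) (k : Int) : d.get? k = (e.get? k).map gsum := by
  simp [PySem.Dict.get?, h.1, List.find?_map, Function.comp_def, Option.map_map]

lemma gsum_append (cs : List (Int × Int)) (p : Int × Int) (h : cs ≠ []) :
    gsum (cs ++ [p]) = ((gsum cs).1, (gsum cs).2.1, p.1, p.2) := by
  cases cs with
  | nil => exact absurd rfl h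
  | cons c cs' =>
    have h2 : ((c :: cs') ++ [p]).getLast? = some p := List.getLast?_concat
    simp only [List.cons_append] at h2
    simp [gsum, h2]

lemma rel_step (sm : List (List Int)) {d : PySem.Dict Int (Int × Int × Int × Int)}
    {e : PySem.Dict Int (List (Int × Int))} (h : RelAB d e) (p : Int × Int) :
    RelAB (stepA sm d p) (stepB sm e p) := by
  obtain ⟨hitems, hne, hm1, hnd⟩ := h
  have hR : RelAB d e := ⟨hitems, hne, hm1, hnd⟩
  simp only [stepA, stepB]
  generalize PySem.List.pyGetD (PySem.List.pyGetD sm p.1 []) p.2 0 = sid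
  rw [rel_contains hR]
  by_cases hc : e.contains sid = true
  · -- sid already indexed: both update the existing entry
    rw [if_pos hc]
    have hsidne : sid ≠ -1 := by
      intro hEq; rw [hEq, hm1] at hc; exact Bool.false_ne_true hc
    rw [if_pos hsidne]
    obtain ⟨cs, hcs⟩ : ∃ cs, e.get? sid = some cs := by
      have := PySem.Dict.contains_eq_isSome_get? e sid
      rw [hc] at this
      exact Option.isSome_iff_exists.mp this.symm
    have hmem : (sid, cs) ∈ e.items := PySem.Dict.mem_items_of_get?_eq_some e hcs
    have hcsne : cs ≠ [] := hne _ hmem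
    have hdg : d.getD sid (0, 0, 0, 0) = gsum cs := by
      rw [PySem.Dict.getD_eq_get?_getD, rel_get? hR, hcs]; rfl
    have hegd : e.getD sid [] = cs := by rw [PySem.Dict.getD_eq_get?_getD, hcs]; rfl
    rw [PySem.Dict.modify, hegd, hdg]
    refine ⟨?_, ?_, ?_, ?_⟩
    · rw [PySem.Dict.items_insert_of_contains _ _ ((rel_contains hR sid).trans hc),
        PySem.Dict.items_insert_of_contains _ _ hc, hitems,
        List.map_map, List.map_map]
      refine List.map_congr_left ?_
      intro q hq
      by_cases hq1 : q.1 = sid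
      · simp [hq1, gsum_append cs p hcsne]
      · simp [hq1]
    · intro q hq
      rcases (PySem.Dict.mem_items_insert _ _ _ _).mp hq with hq | hq
      · rw [hq]; simp [hcsne]
      · exact hne _ hq.1
    · rw [PySem.Dict.contains_insert]
      simp [hm1, Ne.symm hsidne]
    · exact PySem.Dict.nodup_keys_insert _ _ _ hnd
  · -- sid not yet indexed
    have hcf : e.contains sid = false := by simpa using hc
    rw [if_neg hc]
    by_cases hz : sid = -1
    · -- -1 is skipped by both
      simp only [hz, ne_eq, not_true_eq_false, if_false]
      exact hR
    · -- fresh key: both append a new entry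
      rw [if_pos hz, if_pos hz]
      have hegd : e.getD sid [] = [] := PySem.Dict.getD_of_not_contains e [] hcf
      rw [PySem.Dict.modify, hegd, List.nil_append]
      refine ⟨?_, ?_, ?_, ?_⟩
      · rw [PySem.Dict.items_insert_of_not_contains _ _
            ((rel_contains hR sid).trans hcf),
          PySem.Dict.items_insert_of_not_contains _ _ hcf, hitems]
        simp [gsum]
      · intro q hq
        rcases (PySem.Dict.mem_items_insert _ _ _ _).mp hq with hq | hq
        · rw [hq]; simp
        · exact hne _ hq.1
      · rw [PySem.Dict.contains_insert]
        simp [hm1, Ne.symm hz]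
      · exact PySem.Dict.nodup_keys_insert _ _ _ hnd

lemma rel_fold (sm : List (List Int)) (L : List (Int × Int)) :
    ∀ {d e}, RelAB d e → RelAB (L.foldl (stepA sm) d) (L.foldl (stepB sm) e) := by
  induction L with
  | nil => intro d e h; exact h
  | cons p L ih => intro d e h; exact ih (rel_step sm h p)

lemma rel_empty : RelAB PySem.Dict.empty PySem.Dict.empty := by
  refine ⟨rfl, ?_, rfl, List.nodup_nil⟩
  intro q hq; cases hq

lemma items_fold_ins (l : List (Int × List (Int × Int))) (hf : (l.map (fun q => q.1)).Nodup) :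
    (l.foldl (fun r q => r.insert q.1 (gsum q.2))
      (PySem.Dict.empty : PySem.Dict Int (Int × Int × Int × Int))).items =
      l.map (fun q => (q.1, gsum q.2)) := by
  have h := PySem.Dict.items_foldl_insert_fresh l (fun q => q.1) (fun q => gsum q.2)
    PySem.Dict.empty (fun a _ => PySem.Dict.contains_empty _) hf
  simpa using h

-- ===== VERDICT (by name: the statement is the Claim_ definition above) =====
theorem find_slices_spec : Claim_equal_find_slices := by
  intro sm _ _
  unfold Spec_find_slices
  rw [find_slices_eq, find_slices_alt_eq]
  have hrel := rel_fold sm (cells sm) rel_empty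
  obtain ⟨hitems, hne, hm1, hnd⟩ := hrel
  simp only [PySem.Dict.values]
  rw [items_fold_ins _ (by simpa [PySem.Dict.keys] using hnd), hitems]
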